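-- pv_equiv track=rewrite | github.com/27-Afreen/product-purchase-assisstant | src/recommender/recommend_products_v2.py | extract_concerns
-- ===== SOURCE A (Python) =====
-- def extract_concerns(query):
--     query = query.lower()
--
--     concern_map = {
--         "acne": "Acne",
--         "pimple": "Acne",
--         "breakout": "Acne",
--         "oil": "Oil control",
--         "oily": "Oil control",
--         "pigmentation": "Pigmentation",
--         "dark spots": "Pigmentation",
--         "glow": "Dullness",
--         "dullness": "Dullness",
--         "redness": "Redness",
--         "sensitive": "Redness",
--         "barrier": "Barrier repair",
--         "dry": "Barrier repair",
--         "hydration": "Hydration",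
--         "hydrating": "Hydration",
--     }
--
--     found_concerns = []
--     for key, value in concern_map.items():
--         if key in query and value not in found_concerns:
--             found_concerns.append(value)
--
--     return found_concerns
-- ===== SOURCE B (Python) =====
-- CONCERN_ORDER = ["Acne", "Oil control", "Pigmentation", "Dullness", "Redness", "Barrier repair", "Hydration"]
--
-- # keywords grouped by their first character, so the scan dispatches on q[i]
-- KEYWORDS_BY_FIRST_CHAR = {
--     "a": [("acne", "Acne")],
--     "p": [("pimple", "Acne"), ("pigmentation", "Pigmentation")],
--     "b": [("breakout", "Acne"), ("barrier", "Barrier repair")],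
--     "o": [("oil", "Oil control"), ("oily", "Oil control")],
--     "d": [("dark spots", "Pigmentation"), ("dullness", "Dullness"), ("dry", "Barrier repair")],
--     "g": [("glow", "Dullness")],
--     "r": [("redness", "Redness")],
--     "s": [("sensitive", "Redness")],
--     "h": [("hydration", "Hydration"), ("hydrating", "Hydration")],
-- }
--
--
-- def extract_concerns(query):
--     # single left-to-right scan of the query: at each position try only the
--     # keywords whose first character matches, collecting hit concerns in a set
--     q = query.lower()
--     matched = set()
--     for i, ch in enumerate(q):
--         for kw, concern in KEYWORDS_BY_FIRST_CHAR.get(ch, []):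
--             if q.startswith(kw, i):
--                 matched.add(concern)
--     return [c for c in CONCERN_ORDER if c in matched]
-- ===== Notes on version B (the rewrite author's own statement) =====
-- stated objective: alternative
-- what changed: Replaces A's per-keyword substring searches (one pass over the query for each of the 15 dict keys, plus a dedup membership scan of the result list) with a single left-to-right scan of the query that at each position dispatches on the current character into a first-character keyword table, collects hit concerns in a set, and finally emits the fixed concern order filtered by membership in that set.
import Mathlib
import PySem

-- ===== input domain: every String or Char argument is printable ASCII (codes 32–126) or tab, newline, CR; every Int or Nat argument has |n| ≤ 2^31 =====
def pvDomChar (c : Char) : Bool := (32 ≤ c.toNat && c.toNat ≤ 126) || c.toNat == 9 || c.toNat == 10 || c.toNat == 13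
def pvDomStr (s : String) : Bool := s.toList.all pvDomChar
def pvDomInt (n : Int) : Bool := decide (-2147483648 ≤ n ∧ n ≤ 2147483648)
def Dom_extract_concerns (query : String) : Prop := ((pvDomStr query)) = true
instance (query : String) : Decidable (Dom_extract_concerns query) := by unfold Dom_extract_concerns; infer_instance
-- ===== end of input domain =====

-- B replaces A's 15 per-keyword substring searches (plus result-list dedup) by a single
-- left-to-right scan of the query dispatching on the current character into a
-- first-character keyword table, collecting hit concerns in a set (alternative algorithm).


-- ===== PORT A =====
-- the dict literal concern_map (insertion order)
def pvConcernMap : List (String × String) :=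
  [("acne", "Acne"), ("pimple", "Acne"), ("breakout", "Acne"),
   ("oil", "Oil control"), ("oily", "Oil control"),
   ("pigmentation", "Pigmentation"), ("dark spots", "Pigmentation"),
   ("glow", "Dullness"), ("dullness", "Dullness"),
   ("redness", "Redness"), ("sensitive", "Redness"),
   ("barrier", "Barrier repair"), ("dry", "Barrier repair"),
   ("hydration", "Hydration"), ("hydrating", "Hydration")]

def extract_concerns (query : String) : List String :=
  let q := PySem.Str.lower query
  pvConcernMap.foldl
    (fun found kv =>
      if PySem.Str.isIn kv.1 q && !(found.contains kv.2) then found ++ [kv.2] else found)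
    []

-- ===== PORT B =====
-- module-level CONCERN_ORDER
def pvConcernOrder : List String :=
  ["Acne", "Oil control", "Pigmentation", "Dullness", "Redness", "Barrier repair", "Hydration"]

-- module-level KEYWORDS_BY_FIRST_CHAR (Python's 1-character string keys are Char here)
def pvKwByChar : PySem.Dict Char (List (String × String)) :=
  PySem.Dict.ofList
  [('a', [("acne", "Acne")]),
   ('p', [("pimple", "Acne"), ("pigmentation", "Pigmentation")]),
   ('b', [("breakout", "Acne"), ("barrier", "Barrier repair")]),
   ('o', [("oil", "Oil control"), ("oily", "Oil control")]),
   ('d', [("dark spots", "Pigmentation"), ("dullness", "Dullness"), ("dry", "Barrier repair")]),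
   ('g', [("glow", "Dullness")]),
   ('r', [("redness", "Redness")]),
   ('s', [("sensitive", "Redness")]),
   ('h', [("hydration", "Hydration"), ("hydrating", "Hydration")])]

-- the scan loop of B: q.startswith(kw, i) for 0 ≤ i is exactly 'kw is a prefix of q[i:]',
-- ported as PySem.Chars.startswith (q.drop i) kw.toList
def pvScan (q : List Char) : PySem.Set String :=
  (PySem.List.enumerate q).foldl
    (fun m p =>
      (PySem.Dict.getD pvKwByChar p.2 []).foldl
        (fun m kv =>
          if PySem.Chars.startswith (q.drop p.1.toNat) kv.1.toList then PySem.Set.add m kv.2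
          else m)
        m)
    PySem.Set.empty

def extract_concerns_alt (query : String) : List String :=
  let q := (PySem.Str.lower query).toList
  pvConcernOrder.filter (fun c => PySem.Set.contains (pvScan q) c)

-- ===== PRECONDITION & SPEC =====
def Spec_extract_concerns (query : String) (out : List String) : Prop := out = extract_concerns_alt query
instance (query : String) (out : List String) : Decidable (Spec_extract_concerns query out) := by unfold Spec_extract_concerns; infer_instance

-- ===== CLAIM (what is proved, stated in full; the proofs are below) =====
def Claim_equal_extract_concerns : Prop := ∀ (query : String), Dom_extract_concerns query → Spec_extract_concerns query (extract_concerns query)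

-- ===== LEMMAS AND PROOFS =====

-- B's table, grouped by concern (proof-side helper)
def pvConcernKeywords : List (String × List String) :=
  [("Acne", ["acne", "pimple", "breakout"]),
   ("Oil control", ["oil", "oily"]),
   ("Pigmentation", ["pigmentation", "dark spots"]),
   ("Dullness", ["glow", "dullness"]),
   ("Redness", ["redness", "sensitive"]),
   ("Barrier repair", ["barrier", "dry"]),
   ("Hydration", ["hydration", "hydrating"])]

-- A's loop step, with the substring test abstracted as c
def pvStep (c : String → Bool) (found : List String) (kv : String × String) : List String :=
  if c kv.1 && !(found.contains kv.2) then found ++ [kv.2] else found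

-- once v is in found, a run of keys all mapping to v changes nothing
lemma pvStuck (c : String → Bool) (v : String) (found : List String)
    (h : v ∈ found) (keys : List String) :
    (keys.map (fun k => (k, v))).foldl (pvStep c) found = found := by
  induction keys with
  | nil => rfl
  | cons k ks ih => simp [pvStep, h, ih]

-- a run of keys all mapping to a fresh v contributes [v] iff some key matches
lemma pvGroup (c : String → Bool) (v : String) (found : List String)
    (h : v ∉ found) (keys : List String) :
    (keys.map (fun k => (k, v))).foldl (pvStep c) found
      = if keys.any c then found ++ [v] else found := by
  induction keys with
  | nil => simp
  | cons k ks ih =>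
    by_cases hk : c k = true
    · have hv : v ∈ found ++ [v] := by simp
      simp [pvStep, hk, h, pvStuck c v (found ++ [v]) hv ks]
    · simp at hk
      simp [pvStep, hk, h, ih]

-- A's whole loop over grouped keys equals the grouped filter
lemma pvMain (c : String → Bool) (gs : List (String × List String)) (found : List String)
    (h : ∀ g ∈ gs, g.1 ∉ found)
    (hnd : (gs.map Prod.fst).Nodup) :
    (gs.flatMap (fun g => g.2.map (fun k => (k, g.1)))).foldl (pvStep c) found
      = found ++ (gs.filter (fun g => g.2.any c)).map Prod.fst := by
  induction gs generalizing found with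
  | nil => simp
  | cons g gs ih =>
    have hg : g.1 ∉ found := h g (by simp)
    have hnd' : (gs.map Prod.fst).Nodup := (List.nodup_cons.mp hnd).2
    have hne : g.1 ∉ gs.map Prod.fst := (List.nodup_cons.mp hnd).1
    rw [List.flatMap_cons, List.foldl_append, pvGroup c g.1 found hg g.2]
    by_cases hb : g.2.any c = true
    · have h' : ∀ g' ∈ gs, g'.1 ∉ found ++ [g.1] := by
        intro g' hg'
        have hne' : g.1 ≠ g'.1 := fun e => hne (e ▸ List.mem_map_of_mem hg')
        simp [h g' (List.mem_cons_of_mem g hg'), Ne.symm hne']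
      simp [hb, ih (found ++ [g.1]) h' hnd']
    · rw [Bool.not_eq_true] at hb
      simp [hb, ih found (fun g' hg' => h g' (List.mem_cons_of_mem g hg')) hnd']

-- the concrete dict of A is the grouped flattening of the table
lemma pvFlatten :
    pvConcernMap = pvConcernKeywords.flatMap (fun g => g.2.map (fun k => (k, g.1))) := by
  decide

-- membership in B's inner bucket fold
lemma pvMemInner (L : List (String × String)) (cond : String × String → Bool)
    (m : List String) (x : String) :
    (x ∈ L.foldl (fun m kv => if cond kv then PySem.Set.add m kv.2 else m) m) ↔
      x ∈ m ∨ ∃ kv ∈ L, cond kv = true ∧ kv.2 = x := by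
  induction L generalizing m with
  | nil => simp
  | cons kv L ih =>
    simp only [List.foldl_cons]
    by_cases h : cond kv = true
    · rw [if_pos h, ih]
      simp only [PySem.Set.mem_add, List.mem_cons]
      constructor
      · rintro ((hm | rfl) | ⟨kv', h1, h2, h3⟩)
        · exact Or.inl hm
        · exact Or.inr ⟨kv, Or.inl rfl, h, rfl⟩
        · exact Or.inr ⟨kv', Or.inr h1, h2, h3⟩
      · rintro (hm | ⟨kv', (rfl | h1), h2, h3⟩)
        · exact Or.inl (Or.inl hm)
        · exact Or.inl (Or.inr h3.symm)
        · exact Or.inr ⟨kv', h1, h2, h3⟩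
    · rw [if_neg h, ih]
      simp only [List.mem_cons]
      constructor
      · rintro (hm | ⟨kv', h1, h2, h3⟩)
        · exact Or.inl hm
        · exact Or.inr ⟨kv', Or.inr h1, h2, h3⟩
      · rintro (hm | ⟨kv', (rfl | h1), h2, h3⟩)
        · exact Or.inl hm
        · exact absurd h2 h
        · exact Or.inr ⟨kv', h1, h2, h3⟩

-- membership in B's outer scan fold
lemma pvMemOuter (ps : List (Int × Char)) (f : Int × Char → List (String × String))
    (cond : Int × Char → String × String → Bool) (m : List String) (x : String) :
    (x ∈ ps.foldl
        (fun m p => (f p).foldl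
          (fun m kv => if cond p kv then PySem.Set.add m kv.2 else m) m) m) ↔
      x ∈ m ∨ ∃ p ∈ ps, ∃ kv ∈ f p, cond p kv = true ∧ kv.2 = x := by
  induction ps generalizing m with
  | nil => simp
  | cons p ps ih =>
    simp only [List.foldl_cons]
    rw [ih, pvMemInner]
    simp
    rw [or_assoc]

-- every bucket entry is a table pair whose keyword starts with the bucket's character
lemma pvBucketSound (ch : Char) (kv : String × String)
    (h : kv ∈ PySem.Dict.getD pvKwByChar ch []) :
    kv ∈ pvConcernMap ∧ kv.1.toList.head? = some ch := by
  rw [PySem.Dict.getD_eq_get?_getD] at h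
  have e : pvKwByChar = PySem.Dict.mk
    [('a', [("acne", "Acne")]),
     ('p', [("pimple", "Acne"), ("pigmentation", "Pigmentation")]),
     ('b', [("breakout", "Acne"), ("barrier", "Barrier repair")]),
     ('o', [("oil", "Oil control"), ("oily", "Oil control")]),
     ('d', [("dark spots", "Pigmentation"), ("dullness", "Dullness"), ("dry", "Barrier repair")]),
     ('g', [("glow", "Dullness")]),
     ('r', [("redness", "Redness")]),
     ('s', [("sensitive", "Redness")]),
     ('h', [("hydration", "Hydration"), ("hydrating", "Hydration")])] := by rfl
  rw [e] at h
  simp only [PySem.Dict.get?_mk_cons] at h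
  split_ifs at h with h1 h2 h3 h4 h5 h6 h7 h8 h9
  · simp at h1; subst h1; simp only [Option.getD_some] at h; fin_cases h <;> decide
  · simp at h2; subst h2; simp only [Option.getD_some] at h; fin_cases h <;> decide
  · simp at h3; subst h3; simp only [Option.getD_some] at h; fin_cases h <;> decide
  · simp at h4; subst h4; simp only [Option.getD_some] at h; fin_cases h <;> decide
  · simp at h5; subst h5; simp only [Option.getD_some] at h; fin_cases h <;> decide
  · simp at h6; subst h6; simp only [Option.getD_some] at h; fin_cases h <;> decide
  · simp at h7; subst h7; simp only [Option.getD_some] at h; fin_cases h <;> decide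
  · simp at h8; subst h8; simp only [Option.getD_some] at h; fin_cases h <;> decide
  · simp at h9; subst h9; simp only [Option.getD_some] at h; fin_cases h <;> decide
  · simp [PySem.Dict.get?] at h

-- every table pair sits in the bucket of its first character
lemma pvBucketComplete (kv : String × String) (h : kv ∈ pvConcernMap) :
    ∃ ch, kv.1.toList.head? = some ch ∧ kv ∈ PySem.Dict.getD pvKwByChar ch [] := by
  simp [pvConcernMap] at h
  rcases h with h|h|h|h|h|h|h|h|h|h|h|h|h|h|h
  all_goals subst h
  · exact ⟨'a', by decide, by decide⟩
  · exact ⟨'p', by decide, by decide⟩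
  · exact ⟨'b', by decide, by decide⟩
  · exact ⟨'o', by decide, by decide⟩
  · exact ⟨'o', by decide, by decide⟩
  · exact ⟨'p', by decide, by decide⟩
  · exact ⟨'d', by decide, by decide⟩
  · exact ⟨'g', by decide, by decide⟩
  · exact ⟨'d', by decide, by decide⟩
  · exact ⟨'r', by decide, by decide⟩
  · exact ⟨'s', by decide, by decide⟩
  · exact ⟨'b', by decide, by decide⟩
  · exact ⟨'d', by decide, by decide⟩
  · exact ⟨'h', by decide, by decide⟩
  · exact ⟨'h', by decide, by decide⟩

-- characterization of the scanned set
lemma pvScanMem (q : List Char) (x : String) :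
    (x ∈ pvScan q) ↔
      ∃ kv ∈ pvConcernMap, kv.2 = x ∧ PySem.Chars.isIn kv.1.toList q = true := by
  unfold pvScan
  rw [pvMemOuter]
  constructor
  · rintro (h | ⟨p, hp, kv, hkv, hsw, hx⟩)
    · simp [PySem.Set.empty] at h
    · obtain ⟨hm, hhead⟩ := pvBucketSound p.2 kv hkv
      refine ⟨kv, hm, hx, ?_⟩
      rw [← PySem.Chars.exists_prefix_drop_iff_isIn]
      exact ⟨p.1.toNat, (PySem.Chars.startswith_iff _ _).mp hsw⟩
  · rintro ⟨kv, hm, hx, hin⟩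
    obtain ⟨ch, hhead, hbucket⟩ := pvBucketComplete kv hm
    obtain ⟨j, hpre⟩ := (PySem.Chars.exists_prefix_drop_iff_isIn _ _).mpr hin
    obtain ⟨tl, htl⟩ : ∃ tl, kv.1.toList = ch :: tl := by
      cases hcs : kv.1.toList with
      | nil => rw [hcs] at hhead; cases hhead
      | cons c t => rw [hcs] at hhead; simp at hhead; exact ⟨t, by rw [hhead]⟩
    obtain ⟨t, ht⟩ := hpre
    rw [htl] at ht
    have hdrop : q.drop j = ch :: (tl ++ t) := by rw [← ht]; simp
    have hj : j < q.length := by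
      by_contra hge
      rw [List.drop_eq_nil_of_le (by omega)] at hdrop
      cases hdrop
    have hq : q[j] = ch := by
      have h2 : q[j]? = some ch := by rw [← List.head?_drop, hdrop]; rfl
      simpa [List.getElem?_eq_getElem hj] using h2
    refine Or.inr ⟨((j : Int), ch), ?_, kv, ?_, ?_, hx⟩
    · rw [PySem.List.mem_enumerate_iff]
      exact ⟨j, hj, by simp [hq]⟩
    · exact hbucket
    · rw [Int.toNat_natCast]
      rw [PySem.Chars.startswith_iff, htl]
      exact ⟨t, ht⟩

-- per-concern bridge: the scanned set contains a concern iff one of its keywords occurs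
lemma pvKey (query : String) (g : String × List String) (hg : g ∈ pvConcernKeywords) :
    PySem.Set.contains (pvScan ((PySem.Str.lower query).toList)) g.1
      = g.2.any (fun k => PySem.Str.isIn k (PySem.Str.lower query)) := by
  rw [Bool.eq_iff_iff, PySem.Set.contains_iff, pvScanMem, List.any_eq_true]
  fin_cases hg <;> simp [pvConcernMap]

-- ===== VERDICT (by name: the statement is the Claim_ definition above) =====
theorem extract_concerns_spec : Claim_equal_extract_concerns := by
  intro query _
  show extract_concerns query = extract_concerns_alt query
  have hA : extract_concerns query
      = (pvConcernKeywords.filter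
          (fun g => g.2.any (fun k => PySem.Str.isIn k (PySem.Str.lower query)))).map Prod.fst := by
    unfold extract_concerns
    rw [pvFlatten]
    exact pvMain (fun k => PySem.Str.isIn k (PySem.Str.lower query)) pvConcernKeywords []
      (by simp) (by decide)
  rw [hA]
  unfold extract_concerns_alt
  rw [show pvConcernOrder = pvConcernKeywords.map Prod.fst from by decide, List.filter_map]
  exact congrArg (List.map Prod.fst)
    (List.filter_congr (fun g hg => (pvKey query g hg).symm))
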